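-- pv_equiv track=rewrite | github.com/kevin-nothing-matters/QFT | phase_c_v6.py | minimal_cut
-- ===== SOURCE A (Python) =====
-- def minimal_cut(partition_A, n_leaves, depth):
--     setA = set(partition_A)
--     membership = ["A" if i in setA else "B" for i in range(n_leaves)]
--     cuts = 0
--     for level in range(depth):
--         new_mem = []
--         for p in range(0, len(membership), 2):
--             l = membership[p]
--             r = membership[p + 1] if p + 1 < len(membership) else l
--             if l != r:
--                 cuts += 1
--                 new_mem.append("M")
--             elif l == "M" or r == "M":
--                 new_mem.append("M")
--             else:
--                 new_mem.append(l)
--         membership = new_mem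
--     return max(1, cuts)
-- ===== SOURCE B (Python) =====
-- def minimal_cut(partition_A, n_leaves, depth):
--     setA = set(partition_A)
--
--     def levels_needed(n):
--         # smallest k with 2**k >= n (0 for n <= 1)
--         if n <= 1:
--             return 0
--         return 1 + levels_needed((n + 1) // 2)
--
--     def solve(lo, hi, levels):
--         # (label, cuts) for the subtree over the leaf range [lo, hi)
--         if levels == 0 or hi - lo == 1:
--             return ("A" if lo in setA else "B", 0)
--         mid = lo + 2 ** (levels - 1)
--         lab_l, cuts_l = solve(lo, min(mid, hi), levels - 1)
--         if hi <= mid: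
--             return (lab_l, cuts_l)  # no right sibling: inherit left, no cut
--         lab_r, cuts_r = solve(mid, hi, levels - 1)
--         if lab_l != lab_r:
--             return ("M", cuts_l + cuts_r + 1)
--         if lab_l == "M":
--             return ("M", cuts_l + cuts_r)
--         return (lab_l, cuts_l + cuts_r)
--
--     eff = min(depth, levels_needed(n_leaves)) if depth > 0 else 0
--     block = 2 ** eff
--     total = 0
--     lo = 0
--     while lo < n_leaves:
--         total += solve(lo, min(lo + block, n_leaves), eff)[1]
--         lo += block
--     return max(1, total)
-- ===== Notes on version B (the rewrite author's own statement) =====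
-- stated objective: alternative
-- what changed: Replaces A's level-by-level bottom-up sweep over an explicit membership list with a top-down recursive divide-and-conquer solve(lo,hi,levels) over leaf index ranges, driven block-by-block, with the recursion depth capped at ceil(log2 n_leaves) so huge depth values cost nothing.
import Mathlib
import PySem

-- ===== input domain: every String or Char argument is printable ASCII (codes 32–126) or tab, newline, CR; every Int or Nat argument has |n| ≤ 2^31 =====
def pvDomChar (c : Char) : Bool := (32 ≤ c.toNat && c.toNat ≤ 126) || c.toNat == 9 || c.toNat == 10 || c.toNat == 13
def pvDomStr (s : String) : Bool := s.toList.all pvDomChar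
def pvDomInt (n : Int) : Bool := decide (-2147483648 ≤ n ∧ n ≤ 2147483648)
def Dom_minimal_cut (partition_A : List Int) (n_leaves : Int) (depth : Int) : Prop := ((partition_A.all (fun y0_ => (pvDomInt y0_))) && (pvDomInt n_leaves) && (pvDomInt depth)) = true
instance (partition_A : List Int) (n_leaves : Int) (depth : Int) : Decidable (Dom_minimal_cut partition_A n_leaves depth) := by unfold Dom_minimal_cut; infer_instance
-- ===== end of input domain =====

-- B replaces A's level-by-level bottom-up sweep by a top-down divide-and-conquer over leaf
-- index blocks, with the recursion depth capped at ceil(log2 n_leaves) so that huge depths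
-- cost nothing (alternative decomposition).


-- ===== PORT A =====
-- one merged pair: (new label, cuts contributed)
def pvCombineA (l r : String) : String × Int :=
  if l ≠ r then ("M", 1)
  else if l = "M" ∨ r = "M" then ("M", 0)
  else (l, 0)

-- the inner 'for p in range(0, len(membership), 2)' loop: (new_mem, cuts of this level)
def pvPass : List String → List String × Int
  | [] => ([], 0)
  | [l] =>
      let sc := pvCombineA l l   -- r = l when p + 1 is out of range
      ([sc.1], sc.2)
  | l :: r :: rest =>
      let sc := pvCombineA l r
      let tc := pvPass rest
      (sc.1 :: tc.1, sc.2 + tc.2)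

def minimal_cut (partition_A : List Int) (n_leaves : Int) (depth : Int) : Int :=
  let setA := PySem.Set.ofList partition_A
  let membership := (PySem.List.pyRange 0 n_leaves 1).map
      (fun i => if PySem.Set.contains setA i then "A" else "B")
  let st := (PySem.List.pyRange 0 depth 1).foldl
      (fun (st : List String × Int) _ => ((pvPass st.1).1, st.2 + (pvPass st.1).2))
      (membership, 0)
  max 1 st.2

-- ===== PORT B =====
-- smallest k with 2^k ≥ n (0 for n ≤ 1)
def pvLevelsNeeded (n : Int) : Nat :=
  if n ≤ 1 then 0 else 1 + pvLevelsNeeded (PySem.Int.floordiv (n + 1) 2)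
termination_by n.toNat
decreasing_by
  have h2 : (0:Int) < 2 := by omega
  rw [PySem.Int.floordiv_eq_ediv_of_pos h2]
  omega

-- (label, cuts) for the subtree over the leaf range [lo, hi)
def pvSolve (setA : PySem.Set Int) (lo hi : Int) : Nat → String × Int
  | 0 => ((if PySem.Set.contains setA lo then "A" else "B"), 0)
  | k + 1 =>
    if hi - lo = 1 then ((if PySem.Set.contains setA lo then "A" else "B"), 0)
    else
      let mid := lo + 2 ^ k
      let lc := pvSolve setA lo (min mid hi) k
      if hi ≤ mid then lc   -- no right sibling: inherit left, no cut
      else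
        let rc := pvSolve setA mid hi k
        if lc.1 ≠ rc.1 then ("M", lc.2 + rc.2 + 1)
        else if lc.1 = "M" then ("M", lc.2 + rc.2)
        else (lc.1, lc.2 + rc.2)

-- the 'while lo < n_leaves' driver loop
def pvDrive (setA : PySem.Set Int) (n : Int) (eff : Nat) (lo total : Int) : Int :=
  if lo < n then
    pvDrive setA n eff (lo + 2 ^ eff) (total + (pvSolve setA lo (min (lo + 2 ^ eff) n) eff).2)
  else total
termination_by (n - lo).toNat
decreasing_by
  have : (0:Int) < 2 ^ eff := by positivity
  omega

def minimal_cut_alt (partition_A : List Int) (n_leaves : Int) (depth : Int) : Int :=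
  let setA := PySem.Set.ofList partition_A
  let eff : Nat := if 0 < depth then min depth.toNat (pvLevelsNeeded n_leaves) else 0
  max 1 (pvDrive setA n_leaves eff 0 0)

-- ===== PRECONDITION & SPEC =====
def Spec_minimal_cut (partition_A : List Int) (n_leaves : Int) (depth : Int) (out : Int) : Prop := out = minimal_cut_alt partition_A n_leaves depth
instance (partition_A : List Int) (n_leaves : Int) (depth : Int) (out : Int) : Decidable (Spec_minimal_cut partition_A n_leaves depth out) := by unfold Spec_minimal_cut; infer_instance

-- ===== CLAIM (what is proved, stated in full; the proofs are below) =====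
def Claim_equal_minimal_cut : Prop := ∀ (partition_A : List Int) (n_leaves : Int) (depth : Int), Dom_minimal_cut partition_A n_leaves depth → Spec_minimal_cut partition_A n_leaves depth (minimal_cut partition_A n_leaves depth)

-- ===== LEMMAS AND PROOFS =====

-- iterate pvPass k times, accumulating cuts (A's outer loop, counted)
def pvSweep : Nat → List String → List String × Int
  | 0, m => (m, 0)
  | k + 1, m => ((pvSweep k (pvPass m).1).1, (pvPass m).2 + (pvSweep k (pvPass m).1).2)

theorem pvCombineA_self (l : String) : pvCombineA l l = (l, 0) := by
  unfold pvCombineA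
  by_cases h : l = "M" <;> simp [h]

theorem pvPass_nil : pvPass [] = ([], 0) := rfl

theorem pvPass_singleton (x : String) : pvPass [x] = ([x], 0) := by
  simp [pvPass, pvCombineA_self]

theorem pvSweep_nil (k : Nat) : pvSweep k [] = ([], 0) := by
  induction k with
  | zero => rfl
  | succ k ih => simp [pvSweep, pvPass_nil, ih]

theorem pvSweep_singleton (k : Nat) (x : String) : pvSweep k [x] = ([x], 0) := by
  induction k with
  | zero => rfl
  | succ k ih => simp [pvSweep, pvPass_singleton, ih]

theorem pvSweep_succ_right (k : Nat) (m : List String) :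
    pvSweep (k + 1) m =
      ((pvPass (pvSweep k m).1).1, (pvSweep k m).2 + (pvPass (pvSweep k m).1).2) := by
  induction k generalizing m with
  | zero => simp [pvSweep]
  | succ k ih =>
      have h1 : pvSweep (k + 1 + 1) m
          = ((pvSweep (k + 1) (pvPass m).1).1, (pvPass m).2 + (pvSweep (k + 1) (pvPass m).1).2) := rfl
      have h2 : pvSweep (k + 1) m
          = ((pvSweep k (pvPass m).1).1, (pvPass m).2 + (pvSweep k (pvPass m).1).2) := rfl
      rw [h1, ih ((pvPass m).1), h2]
      simp only [Prod.mk.injEq]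
      exact ⟨trivial, by ring⟩

theorem pvPass_append (xs ys : List String) (h : xs.length % 2 = 0) :
    pvPass (xs ++ ys) = ((pvPass xs).1 ++ (pvPass ys).1, (pvPass xs).2 + (pvPass ys).2) := by
  induction xs using pvPass.induct with
  | case1 => simp [pvPass_nil]
  | case2 l => simp at h
  | case3 l r rest ih =>
      have hrest : rest.length % 2 = 0 := by simp at h; omega
      simp only [List.cons_append, pvPass, ih hrest, Prod.mk.injEq]
      exact ⟨trivial, by ring⟩

theorem pvPass_length (m : List String) : (pvPass m).1.length = (m.length + 1) / 2 := by
  induction m using pvPass.induct with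
  | case1 => simp [pvPass_nil]
  | case2 l => simp [pvPass_singleton]
  | case3 l r rest ih => simp only [pvPass, List.length_cons, ih]; omega

theorem pvSweep_append (k : Nat) (xs ys : List String) (h : xs.length = 2 ^ k) :
    pvSweep k (xs ++ ys) =
      ((pvSweep k xs).1 ++ (pvSweep k ys).1, (pvSweep k xs).2 + (pvSweep k ys).2) := by
  induction k generalizing xs ys with
  | zero => simp [pvSweep]
  | succ k ih =>
      have heven : xs.length % 2 = 0 := by rw [h, pow_succ]; omega
      have hlen : (pvPass xs).1.length = 2 ^ k := by rw [pvPass_length, h, pow_succ]; omega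
      simp only [pvSweep, pvPass_append xs ys heven, ih _ _ hlen, Prod.mk.injEq]
      exact ⟨trivial, by ring⟩

theorem pvLevelsNeeded_spec (n : Int) : n ≤ 2 ^ pvLevelsNeeded n := by
  induction n using pvLevelsNeeded.induct with
  | case1 n hle =>
      rw [pvLevelsNeeded, if_pos hle]
      simpa using hle
  | case2 n hle ih =>
      rw [pvLevelsNeeded, if_neg hle,
          PySem.Int.floordiv_eq_ediv_of_pos (by omega : (0:Int) < 2), pow_add, pow_one]
      rw [PySem.Int.floordiv_eq_ediv_of_pos (by omega : (0:Int) < 2)] at ih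
      omega

theorem pvSolve_correct (setA : PySem.Set Int) (k : Nat) (lo hi : Int)
    (h1 : lo < hi) (h2 : hi - lo ≤ 2 ^ k) :
    pvSweep k ((PySem.List.pyRange lo hi 1).map
        (fun i => if PySem.Set.contains setA i then "A" else "B")) =
      ([(pvSolve setA lo hi k).1], (pvSolve setA lo hi k).2) := by
  induction k generalizing lo hi with
  | zero =>
      have hhi : hi = lo + 1 := by simp at h2; omega
      subst hhi
      rw [PySem.List.pyRange_one_singleton]
      simp [pvSweep, pvSolve]
  | succ k ih =>
      have hp : (2:Int) ^ (k + 1) = 2 * 2 ^ k := by ring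
      have hpow : (0:Int) < 2 ^ k := by positivity
      by_cases hsm : hi - lo = 1
      · have hhi : hi = lo + 1 := by omega
        subst hhi
        rw [PySem.List.pyRange_one_singleton]
        simp only [List.map_cons, List.map_nil, pvSweep_singleton]
        simp [pvSolve]
      · by_cases hm : hi ≤ lo + 2 ^ k
        · have hle : hi - lo ≤ 2 ^ k := by omega
          rw [pvSweep_succ_right, ih lo hi h1 hle, pvPass_singleton]
          simp only [pvSolve, if_neg hsm]
          rw [min_eq_right hm, if_pos hm]
          simp
        · rw [not_le] at hm
          rw [PySem.List.pyRange_one_append lo (lo + 2 ^ k) hi (by omega) (le_of_lt hm),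
              List.map_append]
          have hlen : ((PySem.List.pyRange lo (lo + 2 ^ k) 1).map
              (fun i => if PySem.Set.contains setA i then "A" else "B")).length = 2 ^ k := by
            have hc : (lo + 2 ^ k - lo : Int) = ((2 ^ k : Nat) : Int) := by push_cast; ring
            rw [List.length_map, PySem.List.length_pyRange_one, hc, Int.toNat_natCast]
          rw [pvSweep_succ_right, pvSweep_append k _ _ hlen,
              ih lo (lo + 2 ^ k) (by omega) (by omega),
              ih (lo + 2 ^ k) hi hm (by rw [hp] at h2; omega)]
          simp only [pvSolve, if_neg hsm]
          rw [min_eq_left (le_of_lt hm), if_neg (not_le.mpr hm)]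
          set L := (pvSolve setA lo (lo + 2 ^ k) k).1
          set R := (pvSolve setA (lo + 2 ^ k) hi k).1
          simp only [List.singleton_append, pvPass, pvCombineA]
          split_ifs with hne hM <;> simp_all

theorem pvDrive_acc (setA : PySem.Set Int) (n : Int) (eff : Nat) (lo t : Int) :
    pvDrive setA n eff lo t = t + pvDrive setA n eff lo 0 := by
  by_cases hlt : lo < n
  · rw [pvDrive, if_pos hlt]
    conv_rhs => rw [pvDrive, if_pos hlt]
    rw [pvDrive_acc setA n eff (lo + 2 ^ eff)
          (t + (pvSolve setA lo (min (lo + 2 ^ eff) n) eff).2),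
        pvDrive_acc setA n eff (lo + 2 ^ eff)
          (0 + (pvSolve setA lo (min (lo + 2 ^ eff) n) eff).2)]
    ring
  · rw [pvDrive, if_neg hlt]
    conv_rhs => rw [pvDrive, if_neg hlt]
    ring
termination_by (n - lo).toNat
decreasing_by
  all_goals
    (have : (0:Int) < 2 ^ eff := by positivity
     omega)

theorem pvDrive_correct (setA : PySem.Set Int) (n : Int) (eff : Nat) (lo : Int) :
    pvDrive setA n eff lo 0 =
      (pvSweep eff ((PySem.List.pyRange lo n 1).map
        (fun i => if PySem.Set.contains setA i then "A" else "B"))).2 := by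
  by_cases hlt : lo < n
  · have hpow : (0:Int) < 2 ^ eff := by positivity
    rw [pvDrive, if_pos hlt,
        pvDrive_acc setA n eff (lo + 2 ^ eff)
          (0 + (pvSolve setA lo (min (lo + 2 ^ eff) n) eff).2)]
    by_cases hb : n ≤ lo + 2 ^ eff
    · rw [min_eq_right hb, pvDrive, if_neg (by omega : ¬ lo + 2 ^ eff < n)]
      rw [pvSolve_correct setA eff lo n hlt (by omega)]
      ring
    · rw [not_le] at hb
      rw [min_eq_left (le_of_lt hb),
          PySem.List.pyRange_one_append lo (lo + 2 ^ eff) n (by omega) (le_of_lt hb),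
          List.map_append]
      have hlen : ((PySem.List.pyRange lo (lo + 2 ^ eff) 1).map
          (fun i => if PySem.Set.contains setA i then "A" else "B")).length = 2 ^ eff := by
        have hc : (lo + 2 ^ eff - lo : Int) = ((2 ^ eff : Nat) : Int) := by push_cast; ring
        rw [List.length_map, PySem.List.length_pyRange_one, hc, Int.toNat_natCast]
      rw [pvSweep_append eff _ _ hlen,
          pvSolve_correct setA eff lo (lo + 2 ^ eff) (by omega) (by omega),
          pvDrive_correct setA n eff (lo + 2 ^ eff)]
      ring
  · rw [pvDrive, if_neg hlt,
        PySem.List.pyRange_one_eq_nil (by omega : n ≤ lo), List.map_nil, pvSweep_nil]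
termination_by (n - lo).toNat
decreasing_by
  all_goals
    (have : (0:Int) < 2 ^ eff := by positivity
     omega)

-- pvSweep composes
theorem pvSweep_add (a b : Nat) (m : List String) :
    pvSweep (a + b) m =
      ((pvSweep b (pvSweep a m).1).1, (pvSweep a m).2 + (pvSweep b (pvSweep a m).1).2) := by
  induction a generalizing m with
  | zero => simp [pvSweep]
  | succ a ih =>
      rw [show a + 1 + b = (a + b) + 1 from by omega]
      simp only [pvSweep, ih ((pvPass m).1), Prod.mk.injEq]
      exact ⟨trivial, by ring⟩

-- A's outer foldl is pvSweep, counted by the length of the range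
theorem pvFoldA (l : List Int) (m : List String) (t : Int) :
    l.foldl (fun (st : List String × Int) _ => ((pvPass st.1).1, st.2 + (pvPass st.1).2)) (m, t) =
      ((pvSweep l.length m).1, t + (pvSweep l.length m).2) := by
  induction l generalizing m t with
  | nil => simp [pvSweep]
  | cons x l ih =>
      simp only [List.foldl_cons, List.length_cons, ih, pvSweep, Prod.mk.injEq]
      exact ⟨trivial, by ring⟩

-- beyond the capped number of levels extra sweeps add no cuts
theorem pvSweep_cap (setA : PySem.Set Int) (n : Int) (d L : Nat) (hL : L ≤ d)
    (hn : n ≤ 2 ^ L) :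
    (pvSweep d ((PySem.List.pyRange 0 n 1).map
        (fun i => if PySem.Set.contains setA i then "A" else "B"))).2 =
      (pvSweep L ((PySem.List.pyRange 0 n 1).map
        (fun i => if PySem.Set.contains setA i then "A" else "B"))).2 := by
  rcases Nat.le.dest hL with ⟨c, rfl⟩
  rw [pvSweep_add]
  by_cases hn0 : 0 < n
  · rw [pvSolve_correct setA L 0 n hn0 (by omega)]
    simp [pvSweep_singleton]
  · rw [PySem.List.pyRange_one_eq_nil (by omega : n ≤ 0), List.map_nil, pvSweep_nil]
    simp [pvSweep_nil]

-- ===== VERDICT (by name: the statement is the Claim_ definition above) =====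
theorem minimal_cut_spec : Claim_equal_minimal_cut := by
  intro partition_A n depth _
  unfold Spec_minimal_cut minimal_cut minimal_cut_alt
  dsimp only
  rw [pvFoldA, pvDrive_correct]
  have hlen : (PySem.List.pyRange 0 depth 1).length = depth.toNat := by
    rw [PySem.List.length_pyRange_one]; simp
  rw [hlen, zero_add]
  congr 1
  by_cases hd : 0 < depth
  · rw [if_pos hd]
    by_cases hcap : depth.toNat ≤ pvLevelsNeeded n
    · rw [min_eq_left hcap]
    · rw [min_eq_right (by omega : pvLevelsNeeded n ≤ depth.toNat)]
      exact pvSweep_cap (PySem.Set.ofList partition_A) n depth.toNat (pvLevelsNeeded n)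
        (by omega) (pvLevelsNeeded_spec n)
  · rw [if_neg hd, show depth.toNat = 0 from by omega]
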